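-- pv_equiv track=rewrite | github.com/DorSkoler/road-distress-classification | experiments/2025-06-28_smart_split_training/smart_data_splitter.py | _extract_labels_from_annotation
-- ===== SOURCE A (Python) =====
-- from typing import Dict, List, Tuple, Optional
--
-- def _extract_labels_from_annotation(ann_data: Dict) -> Dict[str, bool]:
--     """Extract binary labels from annotation tags.
--
--     Args:
--         ann_data: Annotation data from JSON file
--
--     Returns:
--         Dictionary with binary labels
--     """
--     labels = {
--         'damaged': False,
--         'occlusion': False,
--         'cropped': False
--     }
--
--     if 'tags' not in ann_data:
--         return labels
--
--     for tag in ann_data['tags']: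
--         name = tag.get('name', '').lower()
--         value = tag.get('value', '').lower()
--
--         if name == 'damage':
--             labels['damaged'] = value == 'damaged'
--         elif name == 'occlusion':
--             labels['occlusion'] = value == 'occluded'
--         elif name == 'crop':
--             labels['cropped'] = value == 'cropped'
--
--     return labels
-- ===== SOURCE B (Python) =====
-- def _extract_labels_from_annotation(ann_data):
--     """Extract binary labels via three back-to-front searches.
--
--     The last tag with a given name decides, so searching the tag list in
--     reverse and stopping at the first match gives the same answer as A's
--     forward stateful loop."""
--     if 'tags' not in ann_data:
--         return {'damaged': False, 'occlusion': False, 'cropped': False}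
--     tags = ann_data['tags']
--
--     def last_value(key):
--         for tag in reversed(tags):
--             if tag.get('name', '').lower() == key:
--                 return tag.get('value', '').lower()
--         return None
--
--     return {
--         'damaged': last_value('damage') == 'damaged',
--         'occlusion': last_value('occlusion') == 'occluded',
--         'cropped': last_value('crop') == 'cropped',
--     }
-- ===== Notes on version B (the rewrite author's own statement) =====
-- stated objective: alternative
-- what changed: Replaces the single forward pass that mutates a three-flag state with three independent back-to-front searches with early exit: for each label the value of the last tag with that name (first match in reverse) is compared to the expected value.
import Mathlib
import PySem

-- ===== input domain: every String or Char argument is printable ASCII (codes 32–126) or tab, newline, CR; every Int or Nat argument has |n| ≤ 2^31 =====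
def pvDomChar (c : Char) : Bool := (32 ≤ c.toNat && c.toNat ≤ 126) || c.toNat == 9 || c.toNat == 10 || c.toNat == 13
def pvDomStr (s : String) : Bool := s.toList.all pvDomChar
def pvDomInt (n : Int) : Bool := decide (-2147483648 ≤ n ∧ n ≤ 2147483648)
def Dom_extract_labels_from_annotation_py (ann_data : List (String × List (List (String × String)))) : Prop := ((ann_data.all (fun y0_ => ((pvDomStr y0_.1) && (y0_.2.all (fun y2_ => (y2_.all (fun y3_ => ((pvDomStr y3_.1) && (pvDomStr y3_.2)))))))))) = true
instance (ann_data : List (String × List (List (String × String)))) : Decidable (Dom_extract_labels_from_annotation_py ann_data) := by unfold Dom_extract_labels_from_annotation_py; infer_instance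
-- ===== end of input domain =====

-- B replaces A's single forward stateful pass by three independent back-to-front
-- searches (first match in reverse = last tag wins); alternative decomposition, same O(n).


-- ===== PORT A =====
-- tag.get('name','').lower() / tag.get('value','').lower(), used verbatim by both Pythons
def pvTagName (tag : List (String × String)) : String := PySem.Str.lower ((PySem.Dict.ofList tag).getD "name" "")
def pvTagValue (tag : List (String × String)) : String := PySem.Str.lower ((PySem.Dict.ofList tag).getD "value" "")
-- labels has three fixed keys throughout, so A's mutated dict is carried as the Bool
-- triple (damaged, occlusion, cropped); branches in source order.
def pvStepA (st : Bool × Bool × Bool) (tag : List (String × String)) : Bool × Bool × Bool :=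
  if pvTagName tag = "damage" then (decide (pvTagValue tag = "damaged"), st.2.1, st.2.2)
  else if pvTagName tag = "occlusion" then (st.1, decide (pvTagValue tag = "occluded"), st.2.2)
  else if pvTagName tag = "crop" then (st.1, st.2.1, decide (pvTagValue tag = "cropped"))
  else st
def extract_labels_from_annotation_py (ann_data : List (String × List (List (String × String)))) : List (String × Bool) :=
  match (PySem.Dict.ofList ann_data).get? "tags" with
  | none => [("damaged", false), ("occlusion", false), ("cropped", false)]
  | some tags =>
    let s := tags.foldl pvStepA (false, false, false)
    [("damaged", s.1), ("occlusion", s.2.1), ("cropped", s.2.2)]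

-- ===== PORT B =====
-- B's last_value(key): scan the reversed tag list, return the value of the first
-- tag whose lowered name equals key (early exit), else None.
def pvLastValue (key : String) : List (List (String × String)) → Option String
  | [] => none
  | tag :: rest => if pvTagName tag = key then some (pvTagValue tag) else pvLastValue key rest
def extract_labels_from_annotation_py_alt (ann_data : List (String × List (List (String × String)))) : List (String × Bool) :=
  match (PySem.Dict.ofList ann_data).get? "tags" with
  | none => [("damaged", false), ("occlusion", false), ("cropped", false)]
  | some tags =>
    [("damaged", pvLastValue "damage" tags.reverse == some "damaged"),
     ("occlusion", pvLastValue "occlusion" tags.reverse == some "occluded"),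
     ("cropped", pvLastValue "crop" tags.reverse == some "cropped")]

-- ===== PRECONDITION & SPEC =====
def Spec_extract_labels_from_annotation_py (ann_data : List (String × List (List (String × String)))) (out : List (String × Bool)) : Prop := out = extract_labels_from_annotation_py_alt ann_data
instance (ann_data : List (String × List (List (String × String)))) (out : List (String × Bool)) : Decidable (Spec_extract_labels_from_annotation_py ann_data out) := by unfold Spec_extract_labels_from_annotation_py; infer_instance

-- ===== CLAIM (what is proved, stated in full; the proofs are below) =====
def Claim_equal_extract_labels_from_annotation_py : Prop := ∀ (ann_data : List (String × List (List (String × String)))), Dom_extract_labels_from_annotation_py ann_data → Spec_extract_labels_from_annotation_py ann_data (extract_labels_from_annotation_py ann_data)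

-- ===== LEMMAS AND PROOFS =====

-- first match in xs ++ ys: xs is searched first
theorem pvLastValue_append (key : String) (xs ys : List (List (String × String))) :
    pvLastValue key (xs ++ ys)
    = match pvLastValue key xs with
      | some v => some v
      | none => pvLastValue key ys := by
  induction xs with
  | nil => rfl
  | cons t rest ih =>
      simp only [List.cons_append, pvLastValue]
      split_ifs <;> simp [ih]

-- how the result of B's reverse search decides one component of A's state update
def pvRead (exp : String) (st : Bool) : Option String → Bool
  | none => st
  | some v => decide (v = exp)

-- componentwise reading of A's loop body
theorem pv_stepA_fst (st : Bool × Bool × Bool) (tag : List (String × String)) :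
    (pvStepA st tag).1 = if pvTagName tag = "damage" then decide (pvTagValue tag = "damaged") else st.1 := by
  unfold pvStepA; split_ifs <;> rfl

theorem pv_stepA_snd (st : Bool × Bool × Bool) (tag : List (String × String)) :
    (pvStepA st tag).2.1 = if pvTagName tag = "occlusion" then decide (pvTagValue tag = "occluded") else st.2.1 := by
  unfold pvStepA; split_ifs <;> first | rfl | (exfalso; simp_all)

theorem pv_stepA_thd (st : Bool × Bool × Bool) (tag : List (String × String)) :
    (pvStepA st tag).2.2 = if pvTagName tag = "crop" then decide (pvTagValue tag = "cropped") else st.2.2 := by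
  unfold pvStepA; split_ifs <;> first | rfl | (exfalso; simp_all)

-- A's fold, read componentwise, is B's reverse search
theorem pv_fold_fst (tags : List (List (String × String))) (st : Bool × Bool × Bool) :
    (tags.foldl pvStepA st).1 = pvRead "damaged" st.1 (pvLastValue "damage" tags.reverse) := by
  induction tags generalizing st with
  | nil => rfl
  | cons t rest ih =>
      simp only [List.foldl, List.reverse_cons, pvLastValue_append, ih]
      cases h : pvLastValue "damage" rest.reverse with
      | some v => rfl
      | none =>
          simp only [pvRead, pvLastValue, pv_stepA_fst]
          split_ifs <;> rfl

theorem pv_fold_snd (tags : List (List (String × String))) (st : Bool × Bool × Bool) :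
    (tags.foldl pvStepA st).2.1 = pvRead "occluded" st.2.1 (pvLastValue "occlusion" tags.reverse) := by
  induction tags generalizing st with
  | nil => rfl
  | cons t rest ih =>
      simp only [List.foldl, List.reverse_cons, pvLastValue_append, ih]
      cases h : pvLastValue "occlusion" rest.reverse with
      | some v => rfl
      | none =>
          simp only [pvRead, pvLastValue, pv_stepA_snd]
          split_ifs <;> rfl

theorem pv_fold_thd (tags : List (List (String × String))) (st : Bool × Bool × Bool) :
    (tags.foldl pvStepA st).2.2 = pvRead "cropped" st.2.2 (pvLastValue "crop" tags.reverse) := by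
  induction tags generalizing st with
  | nil => rfl
  | cons t rest ih =>
      simp only [List.foldl, List.reverse_cons, pvLastValue_append, ih]
      cases h : pvLastValue "crop" rest.reverse with
      | some v => rfl
      | none =>
          simp only [pvRead, pvLastValue, pv_stepA_thd]
          split_ifs <;> rfl

-- pvRead from a False start is the option-equality test B writes
theorem pv_read_false (exp : String) (o : Option String) :
    pvRead exp false o = (o == some exp) := by
  cases o with
  | none => rfl
  | some v => exact Bool.eq_iff_iff.mpr (by simp [pvRead])

-- ===== VERDICT (by name: the statement is the Claim_ definition above) =====
theorem extract_labels_from_annotation_py_spec : Claim_equal_extract_labels_from_annotation_py := by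
  intro ann_data _
  unfold Spec_extract_labels_from_annotation_py extract_labels_from_annotation_py extract_labels_from_annotation_py_alt
  cases h : (PySem.Dict.ofList ann_data).get? "tags" with
  | none => rfl
  | some tags =>
      simp only [pv_fold_fst, pv_fold_snd, pv_fold_thd, pv_read_false]
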